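-- pv_equiv track=rewrite | github.com/miaoyuyang/CSE231 | proj07/proj06_hai.py | calc_totals
-- ===== SOURCE A (Python) =====
-- def calc_totals(data_sorted):
--     '''
-- 	Input the output of function read_2016_file then output a calculated total in form of list
-- 	'''
--     result = [0,0,0] #initialize a list with all zeros
--     for d in data_sorted:
-- 		# add all the values under three conditions
--         result[0] += d[1]
--         result[1] += d[2]
--         result[2] += d[4]
--
--     total = result[0] + result[1] + result[2] #calculate total
--     result.append(total) # append total to the list
--     result = tuple(result) # convert to tuple
--     return result
-- ===== SOURCE B (Python) =====
-- def calc_totals(data_sorted):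
--     s1 = sum(d[1] for d in data_sorted)
--     s2 = sum(d[2] for d in data_sorted)
--     s3 = sum(d[4] for d in data_sorted)
--     return (s1, s2, s3, s1 + s2 + s3)
-- ===== Notes on version B (the rewrite author's own statement) =====
-- stated objective: simpler
-- what changed: Replaced the single loop mutating a 3-slot list (then append+tuple) by three independent column sums combined at the end.
import Mathlib
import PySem

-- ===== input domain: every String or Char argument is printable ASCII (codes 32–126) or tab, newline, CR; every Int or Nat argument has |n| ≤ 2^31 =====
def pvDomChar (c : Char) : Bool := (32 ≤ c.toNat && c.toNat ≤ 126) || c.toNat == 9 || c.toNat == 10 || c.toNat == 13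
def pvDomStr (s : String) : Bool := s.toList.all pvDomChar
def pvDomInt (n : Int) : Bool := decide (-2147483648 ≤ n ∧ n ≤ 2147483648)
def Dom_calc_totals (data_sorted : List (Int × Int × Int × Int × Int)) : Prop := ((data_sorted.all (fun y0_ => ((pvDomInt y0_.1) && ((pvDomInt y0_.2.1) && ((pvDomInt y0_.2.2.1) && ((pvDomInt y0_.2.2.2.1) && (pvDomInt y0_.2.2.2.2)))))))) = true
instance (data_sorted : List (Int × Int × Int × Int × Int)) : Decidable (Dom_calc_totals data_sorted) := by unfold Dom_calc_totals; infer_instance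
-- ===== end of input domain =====

-- B replaces A's single accumulating loop over a 3-slot list by three independent column sums (objective: simpler).

-- ===== PORT A =====
-- A: one loop accumulating (result0, result1, result2), then total and tuple
def calc_totals (data_sorted : List (Int × Int × Int × Int × Int)) : Int × Int × Int × Int :=
  let result := data_sorted.foldl
    (fun (r : Int × Int × Int) d => (r.1 + d.2.1, r.2.1 + d.2.2.1, r.2.2 + d.2.2.2.2))
    (0, 0, 0)
  let total := result.1 + result.2.1 + result.2.2
  (result.1, result.2.1, result.2.2, total)

-- ===== PORT B =====
-- B: three independent column sums, combined at the end
def calc_totals_alt (data_sorted : List (Int × Int × Int × Int × Int)) : Int × Int × Int × Int :=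
  let s1 := (data_sorted.map (fun d => d.2.1)).sum
  let s2 := (data_sorted.map (fun d => d.2.2.1)).sum
  let s3 := (data_sorted.map (fun d => d.2.2.2.2)).sum
  (s1, s2, s3, s1 + s2 + s3)

-- ===== PRECONDITION & SPEC =====
def Spec_calc_totals (data_sorted : List (Int × Int × Int × Int × Int)) (out : Int × Int × Int × Int) : Prop := out = calc_totals_alt data_sorted
instance (data_sorted : List (Int × Int × Int × Int × Int)) (out : Int × Int × Int × Int) : Decidable (Spec_calc_totals data_sorted out) := by unfold Spec_calc_totals; infer_instance

-- ===== CLAIM (what is proved, stated in full; the proofs are below) =====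
def Claim_equal_calc_totals : Prop := ∀ (data_sorted : List (Int × Int × Int × Int × Int)), Dom_calc_totals data_sorted → Spec_calc_totals data_sorted (calc_totals data_sorted)

-- ===== LEMMAS AND PROOFS =====
-- loop invariant: A's fold from any accumulator equals that accumulator plus B's three column sums
theorem calc_totals_fold (l : List (Int × Int × Int × Int × Int)) (a b c : Int) :
    l.foldl (fun (r : Int × Int × Int) d => (r.1 + d.2.1, r.2.1 + d.2.2.1, r.2.2 + d.2.2.2.2)) (a, b, c)
      = (a + (l.map (fun d => d.2.1)).sum, b + (l.map (fun d => d.2.2.1)).sum,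
         c + (l.map (fun d => d.2.2.2.2)).sum) := by
  induction l generalizing a b c with
  | nil => simp
  | cons h t ih => simp [List.foldl, ih]; ring_nf; simp [add_left_comm]

-- ===== VERDICT (by name: the statement is the Claim_ definition above) =====
theorem calc_totals_spec : Claim_equal_calc_totals := by
  intro l _
  unfold Spec_calc_totals calc_totals calc_totals_alt
  simp [calc_totals_fold]
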